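-- pv_equiv track=rewrite | github.com/lansetianhuo/test | peiziqiepian-文件以数组形式读入.py | qiepian_hansu
-- ===== SOURCE A (Python) =====
-- peizhi_qiepian_biaoshifu = "#"
--
-- def qiepian_hansu(peizhi, peizhi_qiepian_piaoshifu, wuyingshuju):
--     """
--     创建配置文切片函数，将配置文件按回车分隔成元素存入列表peizhi_liebiao，对元素进行格式化，
--     再按配置文件切片分隔符对列表查行切片，并存储在列表peizhi_qiepian_geishihua_jihe中。
--     函数有三个参数：
--     peizhi：配置文件内容，用于将配置文件内容以字符串形式传递给函数处理；
--     peizhi_qiepian_piaoshifu：配置文件切片分隔符，定义以什么字符作为配置文件切片分隔符；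
--     wuyingshuju：定义以什么字符作为行开头要清理掉的无用数据
--     """
--     # 创建配置数据分片列表，并赋值为空。
--     peizhi_qiepian = []
--     # 创建分片元素开始索引，并赋值为0，从第一个开始。
--     yuansu_start_suoyin = 0
--     # 对配置列表按配置文件切片分隔符进行切片(以元素开头为分隔符的进行切片)
--     for yuansu_suoyin in range(len(peizhi)):
--         peizhi[yuansu_suoyin].strip('\n')
--         if peizhi[yuansu_suoyin].startswith(peizhi_qiepian_biaoshifu):
--             # 将切片存入列表peizhi_qiepian
--             peizhi_qiepian.append(peizhi[yuansu_start_suoyin:yuansu_suoyin])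
--             # 将元素开始索引变为当前索值
--             yuansu_start_suoyin = yuansu_suoyin
--     # 创建配置切片格式化数据临时字符串变量
--     peizhi_qiepian_geishihua = ""
--     # 创建配置切片格式化后数据速查存储列表变量
--     peizhi_qiepian_geishihua_jihe = []
--     # 对配置切片中数据进行整理
--     for peizhi_qiepian_ziji in peizhi_qiepian:
--         for peizhi_qiepian_yuansu in peizhi_qiepian_ziji:
--             # 去除元素前、后空格
--             peizhi_qiepian_yuansu = peizhi_qiepian_yuansu.strip()
--             # 通过列表转存的方式去除以wuyingshuju变量内容开头的无用数据
--             if not peizhi_qiepian_yuansu.startswith(wuyingshuju):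
--                 # 去除内容为空的元素
--                 if len(peizhi_qiepian_yuansu):
--                     # 将元素以字符形式存入peizhi_qiepian_geishihua变量，并设置以","号为分隔符
--                     peizhi_qiepian_geishihua = peizhi_qiepian_geishihua + str(
--                         peizhi_qiepian_yuansu) + ","
--         # 去除整段字符串前、后的","号
--         peizhi_qiepian_geishihua = peizhi_qiepian_geishihua.strip(',')
--         # 去除内容为空的元素
--         if len(peizhi_qiepian_geishihua):
--             # 将peizhi_qiepian_geishihua内容转存到peizhi_qiepian_geishihua_jihe
--             peizhi_qiepian_geishihua_jihe.append(peizhi_qiepian_geishihua)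
--         # 将peizhi_qiepian_geishihua处空，用于下一个循使用
--         peizhi_qiepian_geishihua = ""
--     # 返回完成切片的配置数据列表，函数返回值
--     return peizhi_qiepian_geishihua_jihe
-- ===== SOURCE B (Python) =====
-- peizhi_qiepian_biaoshifu = "#"
--
-- def _fmt(seg, wuyingshuju):
--     s = ""
--     for line in seg:
--         t = line.strip()
--         if not t.startswith(wuyingshuju) and len(t) != 0:
--             s = s + t + ","
--     return s.strip(',')
--
-- def qiepian_hansu(peizhi, peizhi_qiepian_piaoshifu, wuyingshuju):
--     result = []
--     cur = []
--     for line in peizhi: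
--         if line.startswith(peizhi_qiepian_biaoshifu):
--             f = _fmt(cur, wuyingshuju)
--             if len(f) != 0:
--                 result.append(f)
--             cur = [line]
--         else:
--             cur.append(line)
--     return result
-- ===== Notes on version B (the rewrite author's own statement) =====
-- stated objective: simpler
-- what changed: Replaces A's two passes (index loop building a list of slices, then a nested formatting loop with a manually reset accumulator string) by one structural pass that keeps a single current-segment list, flushing it through a small formatting helper whenever a '#' marker line starts a new segment.
import Mathlib
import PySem

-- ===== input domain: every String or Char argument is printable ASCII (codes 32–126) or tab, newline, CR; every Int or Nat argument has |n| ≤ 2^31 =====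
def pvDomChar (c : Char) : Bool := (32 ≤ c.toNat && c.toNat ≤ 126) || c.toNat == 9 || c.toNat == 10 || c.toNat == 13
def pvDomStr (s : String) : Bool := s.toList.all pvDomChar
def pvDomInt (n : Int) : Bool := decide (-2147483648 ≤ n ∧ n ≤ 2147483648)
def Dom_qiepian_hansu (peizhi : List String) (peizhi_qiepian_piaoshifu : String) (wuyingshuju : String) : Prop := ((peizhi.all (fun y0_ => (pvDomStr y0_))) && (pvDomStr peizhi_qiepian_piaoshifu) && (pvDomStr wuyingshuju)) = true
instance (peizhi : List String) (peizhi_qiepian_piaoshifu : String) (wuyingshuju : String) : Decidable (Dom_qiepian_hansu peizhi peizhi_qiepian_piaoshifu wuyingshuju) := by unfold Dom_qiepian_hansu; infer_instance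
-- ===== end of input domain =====

-- B replaces A's two passes (slice list, then formatting loop) by one pass with a
-- current-segment list flushed at each '#' marker; same cost, simpler decomposition.

-- ===== PORT A =====
-- literal transliteration of A: first pass over range(len(peizhi)) building the
-- slice list and the running start index, second pass formatting each slice with a
-- string accumulator that is reset to "" after every slice.
def qiepian_hansu (peizhi : List String) (peizhi_qiepian_piaoshifu : String) (wuyingshuju : String) : List String :=
  let st :=
    (PySem.List.pyRange 0 (peizhi.length : Int) 1).foldl
      (fun (st : List (List String) × Int) i =>
        -- peizhi[i].strip('\n') in A is computed and discarded; no effect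
        if PySem.Str.startswith (PySem.List.pyGetD peizhi i "") "#" then
          (st.1 ++ [PySem.List.slice peizhi (some st.2) (some i)], i)
        else st)
      ([], 0)
  let st2 :=
    st.1.foldl
      (fun (st2 : String × List String) seg =>
        let g :=
          seg.foldl
            (fun g y =>
              let y := PySem.Str.strip y
              if ¬ PySem.Str.startswith y wuyingshuju then
                if PySem.Str.len y ≠ 0 then g ++ y ++ "," else g
              else g)
            st2.1
        let g := PySem.Str.stripChars g ","
        ("", if PySem.Str.len g ≠ 0 then st2.2 ++ [g] else st2.2))
      ("", [])
  st2.2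

-- ===== PORT B =====
-- helper of B: format one segment (strip, drop skipped/empty lines, join with ',', strip ',')
def pvFmtSeg (wuyingshuju : String) (seg : List String) : String :=
  PySem.Str.stripChars
    (seg.foldl
      (fun s line =>
        let t := PySem.Str.strip line
        if ¬ PySem.Str.startswith t wuyingshuju ∧ PySem.Str.len t ≠ 0 then s ++ t ++ "," else s)
      "") ","

def qiepian_hansu_alt (peizhi : List String) (peizhi_qiepian_piaoshifu : String) (wuyingshuju : String) : List String :=
  (peizhi.foldl
    (fun (st : List String × List String) line =>
      if PySem.Str.startswith line "#" then
        ((if PySem.Str.len (pvFmtSeg wuyingshuju st.2) ≠ 0 then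
            st.1 ++ [pvFmtSeg wuyingshuju st.2]
          else st.1), [line])
      else (st.1, st.2 ++ [line]))
    ([], [])).1

-- ===== PRECONDITION & SPEC =====
def Spec_qiepian_hansu (peizhi : List String) (peizhi_qiepian_piaoshifu : String) (wuyingshuju : String) (out : List String) : Prop := out = qiepian_hansu_alt peizhi peizhi_qiepian_piaoshifu wuyingshuju
instance (peizhi : List String) (peizhi_qiepian_piaoshifu : String) (wuyingshuju : String) (out : List String) : Decidable (Spec_qiepian_hansu peizhi peizhi_qiepian_piaoshifu wuyingshuju out) := by unfold Spec_qiepian_hansu; infer_instance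

-- ===== CLAIM (what is proved, stated in full; the proofs are below) =====
def Claim_equal_qiepian_hansu : Prop := ∀ (peizhi : List String) (peizhi_qiepian_piaoshifu : String) (wuyingshuju : String), Dom_qiepian_hansu peizhi peizhi_qiepian_piaoshifu wuyingshuju → Spec_qiepian_hansu peizhi peizhi_qiepian_piaoshifu wuyingshuju (qiepian_hansu peizhi peizhi_qiepian_piaoshifu wuyingshuju)

-- ===== LEMMAS AND PROOFS =====

-- the "flush" fold: B's appends, expressed over a list of already-collected segments
def pvFlush (wu : String) (acc : List String) (segs : List (List String)) : List String :=
  segs.foldl (fun a seg => if PySem.Str.len (pvFmtSeg wu seg) ≠ 0 then a ++ [pvFmtSeg wu seg] else a) acc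

lemma pvFlush_append (wu : String) (acc : List String) (segs : List (List String)) (seg : List String) :
    pvFlush wu acc (segs ++ [seg]) =
      (if PySem.Str.len (pvFmtSeg wu seg) ≠ 0 then pvFlush wu acc segs ++ [pvFmtSeg wu seg]
       else pvFlush wu acc segs) := by
  unfold pvFlush
  rw [List.foldl_append]
  simp only [List.foldl_cons, List.foldl_nil]

-- A's inner formatting body equals B's (nested ifs vs conjunction)
lemma pvInner_eq (wu : String) :
    (fun (g y : String) =>
        let y := PySem.Str.strip y
        if ¬ PySem.Str.startswith y wu then
          if PySem.Str.len y ≠ 0 then g ++ y ++ "," else g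
        else g) =
      (fun (s line : String) =>
        let t := PySem.Str.strip line
        if ¬ PySem.Str.startswith t wu ∧ PySem.Str.len t ≠ 0 then s ++ t ++ "," else s) := by
  funext g y
  by_cases h1 : PySem.Str.startswith (PySem.Str.strip y) wu <;>
    by_cases h2 : PySem.Str.len (PySem.Str.strip y) ≠ 0 <;> simp_all

-- A's second pass equals the flush fold
lemma pvPass2 (wu : String) (segs : List (List String)) (acc : List String) :
    (segs.foldl
      (fun (st2 : String × List String) seg =>
        let g :=
          seg.foldl
            (fun g y =>
              let y := PySem.Str.strip y
              if ¬ PySem.Str.startswith y wu then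
                if PySem.Str.len y ≠ 0 then g ++ y ++ "," else g
              else g)
            st2.1
        let g := PySem.Str.stripChars g ","
        ("", if PySem.Str.len g ≠ 0 then st2.2 ++ [g] else st2.2))
      ("", acc)).2 = pvFlush wu acc segs := by
  induction segs generalizing acc with
  | nil => simp [pvFlush]
  | cons seg rest ih =>
      simp only [List.foldl_cons, pvFlush, pvFmtSeg, pvInner_eq wu] at *
      exact ih _

-- A's first pass, flushed, equals B's single pass (main invariant)
lemma pvPass1 (peizhi : List String) (wu : String) :
    ∀ (rest : List String) (k s : Nat) (slices : List (List String)) (out : List String),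
      peizhi.drop k = rest → s ≤ k → k ≤ peizhi.length →
      pvFlush wu [] slices = out →
      pvFlush wu []
        (((PySem.List.pyRange (k : Int) (peizhi.length : Int) 1).foldl
            (fun (st : List (List String) × Int) i =>
              if PySem.Str.startswith (PySem.List.pyGetD peizhi i "") "#" then
                (st.1 ++ [PySem.List.slice peizhi (some st.2) (some i)], i)
              else st)
            (slices, (s : Int))).1) =
        (rest.foldl
          (fun (st : List String × List String) line =>
            if PySem.Str.startswith line "#" then
              ((if PySem.Str.len (pvFmtSeg wu st.2) ≠ 0 then
                  st.1 ++ [pvFmtSeg wu st.2]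
                else st.1), [line])
            else (st.1, st.2 ++ [line]))
          (out, PySem.List.slice peizhi (some (s : Int)) (some (k : Int)))).1 := by
  intro rest
  induction rest with
  | nil =>
      intro k s slices out hdrop hs hk hinv
      have hkl : k = peizhi.length := by
        have := List.drop_eq_nil_iff.mp hdrop; omega
      subst hkl
      rw [PySem.List.pyRange_one_eq_nil le_rfl]
      simpa using hinv
  | cons x rest' ih =>
      intro k s slices out hdrop hs hk hinv
      have hklt : k < peizhi.length := by
        by_contra h
        have : peizhi.drop k = [] := List.drop_eq_nil_iff.mpr (by omega)
        simp [this] at hdrop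
      have hget : peizhi[k]? = some x := by
        have : (peizhi.drop k)[0]? = some x := by rw [hdrop]; rfl
        simpa [List.getElem?_drop] using this
      have hdrop' : peizhi.drop (k + 1) = rest' := by
        have : peizhi.drop (k + 1) = (peizhi.drop k).drop 1 := by
          rw [List.drop_drop]
        rw [this, hdrop]; rfl
      have hline : PySem.List.pyGetD peizhi (k : Int) "" = x := by
        simp [PySem.List.pyGetD_natCast, List.getD, hget]
      rw [PySem.List.pyRange_one_cons (by exact_mod_cast hklt)]
      simp only [List.foldl_cons, hline]
      have hcast : ((k : Int) + 1) = ((k + 1 : Nat) : Int) := by push_cast; ring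
      by_cases hsw : PySem.Str.startswith x "#"
      · -- marker line: A appends the slice, B flushes the current segment
        simp only [hsw, if_true]
        rw [hcast]
        have hcur1 : PySem.List.slice peizhi (some ((k : Nat) : Int)) (some ((k + 1 : Nat) : Int)) = [x] := by
          rw [PySem.List.slice_natCast]
          have : peizhi.drop k = x :: rest' := hdrop
          simp [this]
        have := ih (k + 1) k (slices ++ [PySem.List.slice peizhi (some (s : Int)) (some (k : Int))])
          (if PySem.Str.len (pvFmtSeg wu (PySem.List.slice peizhi (some (s : Int)) (some (k : Int)))) ≠ 0 then
              out ++ [pvFmtSeg wu (PySem.List.slice peizhi (some (s : Int)) (some (k : Int)))]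
            else out)
          hdrop' (by omega) (by omega)
          (by rw [pvFlush_append, hinv])
        rw [hcur1] at this
        exact this
      · -- ordinary line: A keeps its state, B extends the current segment
        simp only [hsw]
        rw [hcast]
        have hext : PySem.List.slice peizhi (some (s : Int)) (some ((k + 1 : Nat) : Int)) =
            PySem.List.slice peizhi (some (s : Int)) (some ((k : Nat) : Int)) ++ [x] := by
          rw [PySem.List.slice_natCast, PySem.List.slice_natCast]
          have hq : (peizhi.drop s)[k - s]? = some x := by
            rw [List.getElem?_drop]
            have : s + (k - s) = k := by omega
            rw [this, hget]
          have hkk : k + 1 - s = (k - s) + 1 := by omega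
          rw [hkk, List.take_add_one, hq]
          rfl
        have := ih (k + 1) s slices out hdrop' (by omega) (by omega) hinv
        rw [hext] at this
        exact this

-- ===== VERDICT (by name: the statement is the Claim_ definition above) =====
set_option maxHeartbeats 1000000 in
theorem qiepian_hansu_spec : Claim_equal_qiepian_hansu := by
  intro peizhi sep wu _
  show qiepian_hansu peizhi sep wu = qiepian_hansu_alt peizhi sep wu
  simp only [qiepian_hansu, qiepian_hansu_alt]
  rw [pvPass2 wu]
  have h0 : PySem.List.slice peizhi (some ((0 : Nat) : Int)) (some ((0 : Nat) : Int)) = ([] : List String) := by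
    rw [PySem.List.slice_natCast]; simp
  have h := pvPass1 peizhi wu peizhi 0 0 [] [] (by simp) le_rfl (by omega) (by simp [pvFlush])
  rw [h0] at h
  simp only [Nat.cast_zero] at h
  exact h
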